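-- pv_equiv track=rewrite | github.com/TheDataPantry/CodingProblems | AdventOfCode/2024/Day1/Solution.py | occurrence_count
-- ===== SOURCE A (Python) =====
-- from typing import List
--
-- def occurrence_count(L1: List[int], L2: List[int]) -> int:
--     """
--     Go through 2nd list to count occurrence of values in 1st list and then multiply the values for end result
--     """
--     result = []
--     for i in range(len(L1)):
--         value = L1[i]
--         count = 0
--         for j in range(len(L2)):
--             if L2[j] == value:
--                 count += 1
--         result.append((value, count))
--
--     return sum(a*b for a, b in result)
-- ===== SOURCE B (Python) =====
-- def occurrence_count(L1, L2):
--     counts = {}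
--     for x in L2:
--         counts[x] = counts.get(x, 0) + 1
--     total = 0
--     for v in L1:
--         total += v * counts.get(v, 0)
--     return total
-- ===== Notes on version B (the rewrite author's own statement) =====
-- stated objective: faster
-- what changed: Replaces the nested rescan of L2 for every element of L1 with a dict of counts built once over L2 and a single accumulating pass over L1.
import Mathlib
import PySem

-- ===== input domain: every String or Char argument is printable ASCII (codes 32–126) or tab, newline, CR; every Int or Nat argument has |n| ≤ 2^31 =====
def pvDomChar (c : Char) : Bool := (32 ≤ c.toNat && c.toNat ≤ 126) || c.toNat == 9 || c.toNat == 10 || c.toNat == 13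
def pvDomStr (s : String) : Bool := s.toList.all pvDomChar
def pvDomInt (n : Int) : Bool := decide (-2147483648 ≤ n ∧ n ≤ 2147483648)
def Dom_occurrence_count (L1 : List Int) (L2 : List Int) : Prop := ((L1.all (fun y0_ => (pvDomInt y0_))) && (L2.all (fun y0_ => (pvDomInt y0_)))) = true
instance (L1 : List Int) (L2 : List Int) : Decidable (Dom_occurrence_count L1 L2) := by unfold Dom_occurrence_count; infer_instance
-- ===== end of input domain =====

-- B replaces A's nested rescan of L2 per element of L1 with a dict of counts built once and one accumulating pass (faster in a timing run).

-- ===== PORT A =====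
def occurrence_count (L1 : List Int) (L2 : List Int) : Int :=
  let result : List (Int × Int) :=
    (PySem.List.pyRange 0 (L1.length : Int) 1).foldl (fun res i =>
      let value := PySem.List.pyGetD L1 i 0
      let count := (PySem.List.pyRange 0 (L2.length : Int) 1).foldl (fun c j =>
        if PySem.List.pyGetD L2 j 0 == value then c + 1 else c) (0 : Int)
      res ++ [(value, count)]) []
  (result.map (fun p => p.1 * p.2)).sum

-- ===== PORT B =====
def occurrence_count_alt (L1 : List Int) (L2 : List Int) : Int :=
  let counts : PySem.Dict Int Int :=
    L2.foldl (fun d x => d.insert x (d.getD x 0 + 1)) PySem.Dict.empty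
  L1.foldl (fun total v => total + v * counts.getD v 0) 0

-- ===== PRECONDITION & SPEC =====
def Spec_occurrence_count (L1 : List Int) (L2 : List Int) (out : Int) : Prop := out = occurrence_count_alt L1 L2
instance (L1 : List Int) (L2 : List Int) (out : Int) : Decidable (Spec_occurrence_count L1 L2 out) := by unfold Spec_occurrence_count; infer_instance

-- ===== CLAIM (what is proved, stated in full; the proofs are below) =====
def Claim_equal_occurrence_count : Prop := ∀ (L1 : List Int) (L2 : List Int), Dom_occurrence_count L1 L2 → Spec_occurrence_count L1 L2 (occurrence_count L1 L2)

-- ===== LEMMAS AND PROOFS =====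

-- ===== VERDICT (by name: the statement is the Claim_ definition above) =====
theorem occurrence_count_spec : Claim_equal_occurrence_count := by
  intro L1 L2 _
  unfold Spec_occurrence_count occurrence_count occurrence_count_alt
  rw [PySem.List.foldl_pyRange_zero_pyGetD' L1 0
        (fun res value => res ++ [(value,
          (PySem.List.pyRange 0 (L2.length : Int) 1).foldl (fun c j =>
            if PySem.List.pyGetD L2 j 0 == value then c + 1 else c) (0 : Int))]) [],
      PySem.Dict.foldl_insert_getD_add_one_eq_counter]
  simp only [PySem.List.foldl_append_singleton_eq_map, PySem.List.foldl_add,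
    PySem.Dict.getD_counter, List.nil_append, List.map_map, zero_add]
  apply congrArg List.sum
  apply List.map_congr_left
  intro v _
  simp only [Function.comp_apply]
  rw [PySem.List.foldl_pyRange_zero_pyGetD' L2 0
        (fun c x => if x == v then c + 1 else c) 0,
      PySem.List.foldl_beq_add_one]
  simp
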